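-- pv_equiv track=rewrite | github.com/BrianLi009/PhysicsCheck_log | candidates/read.py | min_degree
-- ===== SOURCE A (Python) =====
-- def min_degree(M, n):
--     min_rowsum = n
--     for i in range(n):
--         rowsum = 0
--         for j in range(n):
--             if i > j:
--                 rowsum += M[j][i]
--             else:
--                 rowsum += M[i][j]
--         if rowsum < min_rowsum:
--             min_rowsum = rowsum
--     return min_rowsum
-- ===== SOURCE B (Python) =====
-- def min_degree(M, n):
--     rowsum = [0] * n
--     for i in range(n):
--         for j in range(i, n):
--             v = M[i][j]
--             rowsum[i] += v
--             if j > i: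
--                 rowsum[j] += v
--     min_rowsum = n
--     for r in rowsum:
--         if r < min_rowsum:
--             min_rowsum = r
--     return min_rowsum
-- ===== Notes on version B (the rewrite author's own statement) =====
-- stated objective: alternative
-- what changed: Instead of recomputing each row sum from scratch with an i>j mirror branch (reading all n^2 symmetric positions), B makes one scatter pass over the upper triangle only, adding each entry M[i][j] into rowsum[i] and (if j>i) rowsum[j], then takes the minimum of the accumulated array in a separate pass.
import Mathlib
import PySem

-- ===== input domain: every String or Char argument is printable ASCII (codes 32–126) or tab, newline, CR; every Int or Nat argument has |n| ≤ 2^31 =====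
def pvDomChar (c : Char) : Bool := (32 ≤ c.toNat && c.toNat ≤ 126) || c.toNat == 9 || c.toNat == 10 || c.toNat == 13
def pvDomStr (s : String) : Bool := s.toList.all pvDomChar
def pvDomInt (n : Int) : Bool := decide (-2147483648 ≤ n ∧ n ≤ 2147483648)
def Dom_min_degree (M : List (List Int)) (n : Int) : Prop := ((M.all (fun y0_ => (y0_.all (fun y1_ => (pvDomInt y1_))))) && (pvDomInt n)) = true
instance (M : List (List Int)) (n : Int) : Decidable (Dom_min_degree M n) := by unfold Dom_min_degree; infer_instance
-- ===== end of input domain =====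

-- B replaces A's per-row recomputation (with its i>j branch) by one scatter pass over the
-- upper triangle into a rowsum array followed by a separate min pass (objective: alternative).

-- ===== PORT A =====
-- literal port of A: for each i, recompute the whole row sum with the i>j mirror branch,
-- then fold the running minimum (initialised to n). M[x][y] is ported as pyGetD∘pyGetD
-- (in-range under Pre_, where Python returns normally).
def min_degree (M : List (List Int)) (n : Int) : Int :=
  (PySem.List.pyRange 0 n 1).foldl
    (fun min_rowsum i =>
      let rowsum :=
        (PySem.List.pyRange 0 n 1).foldl
          (fun rowsum j =>
            if i > j then rowsum + PySem.List.pyGetD (PySem.List.pyGetD M j []) i 0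
            else rowsum + PySem.List.pyGetD (PySem.List.pyGetD M i []) j 0)
          0
      if rowsum < min_rowsum then rowsum else min_rowsum)
    n

-- ===== PORT B =====
-- body of B's inner loop: v = M[i][j]; rowsum[i] += v; if j > i: rowsum[j] += v
def pvScatterStep (M : List (List Int)) (i : Int) (rs : List Int) (j : Int) : List Int :=
  let v := PySem.List.pyGetD (PySem.List.pyGetD M i []) j 0
  let rs := PySem.List.pySetD rs i (PySem.List.pyGetD rs i 0 + v)
  if j > i then PySem.List.pySetD rs j (PySem.List.pyGetD rs j 0 + v) else rs

-- B's inner loop: for j in range(i, n)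
def pvScatterRow (M : List (List Int)) (n : Int) (rs : List Int) (i : Int) : List Int :=
  (PySem.List.pyRange i n 1).foldl (pvScatterStep M i) rs

def min_degree_alt (M : List (List Int)) (n : Int) : Int :=
  let rowsum := (PySem.List.pyRange 0 n 1).foldl (pvScatterRow M n) (List.replicate n.toNat 0)
  rowsum.foldl (fun min_rowsum r => if r < min_rowsum then r else min_rowsum) n

-- ===== PRECONDITION & SPEC =====
-- Pre_ is exactly where Python A returns normally: it indexes rows 0..n-1 at columns up to
-- n-1, so it raises IndexError iff n > len(M) or some of the first n rows is shorter than n.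
def Pre_min_degree (M : List (List Int)) (n : Int) : Prop :=
  n ≤ (M.length : Int) ∧ ∀ r ∈ M.take n.toNat, n ≤ (r.length : Int)
instance (M : List (List Int)) (n : Int) : Decidable (Pre_min_degree M n) := by
  unfold Pre_min_degree; infer_instance

def pvWitness_min_degree : List (List Int) × Int := ([[0, 1], [1, 0]], 2)

def Spec_min_degree (M : List (List Int)) (n : Int) (out : Int) : Prop := out = min_degree_alt M n
instance (M : List (List Int)) (n : Int) (out : Int) : Decidable (Spec_min_degree M n out) := by
  unfold Spec_min_degree; infer_instance

-- ===== CLAIM (what is proved, stated in full; the proofs are below) =====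
def Claim_equal_min_degree : Prop :=
  ∀ (M : List (List Int)) (n : Int), Dom_min_degree M n → Pre_min_degree M n →
    Spec_min_degree M n (min_degree M n)

-- ===== LEMMAS AND PROOFS =====

-- the symmetric entry both programs read: M[i][j] with defaults (in range under Pre_)
def pvEnt (M : List (List Int)) (i j : Int) : Int :=
  PySem.List.pyGetD (PySem.List.pyGetD M i []) j 0

-- the row sum A computes for row i
def pvRowS (M : List (List Int)) (n i : Int) : Int :=
  ((PySem.List.pyRange 0 n 1).map (fun j => if i > j then pvEnt M j i else pvEnt M i j)).sum

-- tail of row i's own (upper) contributions: sum over j in [t, n) of M[i][j]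
def pvRowTail (M : List (List Int)) (i t n : Int) : Int :=
  ((PySem.List.pyRange t n 1).map (fun j => pvEnt M i j)).sum

-- column contributions to position k from rows i in [t, b)
def pvColSum (M : List (List Int)) (t b k : Int) : Int :=
  ((PySem.List.pyRange t b 1).map (fun i => pvEnt M i k)).sum

theorem pvGetD_set_ite (xs : List Int) (i k : Nat) (v : Int) :
    (xs.set i v).getD k 0 = if k = i ∧ i < xs.length then v else xs.getD k 0 := by
  simp only [List.getD_eq_getElem?_getD, List.getElem?_set]
  split_ifs with h1 h2 h3 <;> simp_all

theorem pvScatterStep_length (M : List (List Int)) (i j : Int) (rs : List Int) :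
    (pvScatterStep M i rs j).length = rs.length := by
  simp only [pvScatterStep]
  split_ifs <;> simp [PySem.List.length_pySetD]

theorem pvScatterStep_getD (M : List (List Int)) (i j : Int) (rs : List Int)
    (hi : 0 ≤ i) (hij : i ≤ j) (hiL : i.toNat < rs.length) (hjL : j.toNat < rs.length)
    (k : Nat) :
    (pvScatterStep M i rs j).getD k 0 =
      rs.getD k 0 + ((if (k : Int) = i then pvEnt M i j else 0)
        + (if i < j ∧ (k : Int) = j then pvEnt M i j else 0)) := by
  have hj : 0 ≤ j := le_trans hi hij
  suffices h : ∀ v : Int,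
      ((if j > i then
          PySem.List.pySetD (PySem.List.pySetD rs i (PySem.List.pyGetD rs i 0 + v)) j
            (PySem.List.pyGetD (PySem.List.pySetD rs i (PySem.List.pyGetD rs i 0 + v)) j 0 + v)
        else PySem.List.pySetD rs i (PySem.List.pyGetD rs i 0 + v)).getD k 0) =
        rs.getD k 0 + ((if (k : Int) = i then v else 0)
          + (if i < j ∧ (k : Int) = j then v else 0)) by
    exact h (pvEnt M i j)
  intro v
  rw [PySem.List.pyGetD_of_nonneg _ _ hi, PySem.List.pySetD_of_nonneg _ _ hi]
  set rs1 := rs.set i.toNat (rs.getD i.toNat 0 + v) with hrs1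
  have hlen1 : rs1.length = rs.length := by rw [hrs1]; exact List.length_set
  have hget1 : ∀ m : Nat, rs1.getD m 0 = rs.getD m 0 + (if (m : Int) = i then v else 0) := by
    intro m
    rw [hrs1, pvGetD_set_ite]
    by_cases h : m = i.toNat
    · subst h
      rw [if_pos (And.intro rfl hiL), if_pos (by omega : ((i.toNat : Int) = i))]
    · rw [if_neg (fun hc => h hc.1), if_neg (by omega : ¬ ((m : Int) = i))]
      ring
  by_cases hlt : j > i
  · rw [if_pos hlt, PySem.List.pyGetD_of_nonneg _ _ hj, PySem.List.pySetD_of_nonneg _ _ hj,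
      pvGetD_set_ite]
    by_cases hk : k = j.toNat
    · subst hk
      rw [if_pos (And.intro rfl (by omega : j.toNat < rs1.length)), hget1,
        if_neg (by omega : ¬ ((j.toNat : Int) = i)),
        if_pos (And.intro hlt (by omega : ((j.toNat : Int) = j)))]
      ring
    · rw [if_neg (fun hc => hk hc.1), hget1,
        if_neg (by omega : ¬ (i < j ∧ (k : Int) = j))]
      ring
  · rw [if_neg hlt, hget1, if_neg (by omega : ¬ (i < j ∧ (k : Int) = j))]
    ring

theorem pvScatterRow_length (M : List (List Int)) (n i : Int) (rs : List Int) :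
    (pvScatterRow M n rs i).length = rs.length := by
  unfold pvScatterRow
  generalize PySem.List.pyRange i n 1 = l
  induction l generalizing rs with
  | nil => rfl
  | cons x xs ih => simp only [List.foldl_cons]; rw [ih, pvScatterStep_length]

-- characterisation of B's inner loop: the remaining fold over j ∈ [t, n) adds to slot i
-- the tail of row i and to each slot k with t ≤ k < n, k ≠ i, the single entry M[i][k]
theorem pvScatterRow_inner (M : List (List Int)) (n i : Int) (hi : 0 ≤ i) (hin : i < n) :
    ∀ (m : Nat) (t : Int), i ≤ t → (n - t).toNat = m →
    ∀ (rs : List Int), rs.length = n.toNat → ∀ k : Nat,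
      ((PySem.List.pyRange t n 1).foldl (pvScatterStep M i) rs).getD k 0 =
        rs.getD k 0 + (if (k : Int) = i then pvRowTail M i t n
          else if t ≤ (k : Int) ∧ (k : Int) < n then pvEnt M i k else 0) := by
  intro m
  induction m with
  | zero =>
    intro t hit h0 rs hlen k
    have hnt : n ≤ t := by omega
    rw [PySem.List.pyRange_one_eq_nil hnt]
    simp only [List.foldl_nil, pvRowTail, PySem.List.pyRange_one_eq_nil hnt, List.map_nil,
      List.sum_nil]
    split_ifs <;> omega
  | succ m ih =>
    intro t hit hm rs hlen k
    have htn : t < n := by omega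
    rw [PySem.List.pyRange_one_cons htn, List.foldl_cons]
    rw [ih (t + 1) (by omega) (by omega) _ (by rw [pvScatterStep_length]; exact hlen)]
    rw [pvScatterStep_getD M i t rs hi hit (by omega) (by omega)]
    have hTail : pvRowTail M i t n = pvEnt M i t + pvRowTail M i (t + 1) n := by
      unfold pvRowTail
      rw [PySem.List.pyRange_one_cons htn, List.map_cons, List.sum_cons]
    by_cases hki : (k : Int) = i
    · have hne : ¬ (i < t ∧ (k : Int) = t) := by omega
      rw [if_pos hki, if_neg hne, if_pos hki, if_pos hki, hTail]
      ring
    · by_cases hkt : (k : Int) = t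
      · have h1 : i < t := by omega
        have hE : pvEnt M i t = pvEnt M i k := by rw [hkt]
        rw [if_neg hki, if_pos (And.intro h1 hkt), if_neg hki,
          if_neg (by omega : ¬ (t + 1 ≤ (k : Int) ∧ (k : Int) < n)), if_neg hki,
          if_pos (And.intro (by omega : t ≤ (k : Int)) (by omega : (k : Int) < n)), hE]
        ring
      · have hne : ¬ (i < t ∧ (k : Int) = t) := by omega
        have hiff : (t + 1 ≤ (k : Int) ∧ (k : Int) < n) ↔ (t ≤ (k : Int) ∧ (k : Int) < n) := by
          omega
        rw [if_neg hki, if_neg hne, if_neg hki, if_congr hiff rfl rfl, if_neg hki]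
        ring

-- characterisation of B's outer loop: after scattering rows [t, n), slot k (t ≤ k < n)
-- holds its old value plus the full upper row k plus the column entries from rows [t, k)
theorem pvScatter_outer (M : List (List Int)) (n : Int) :
    ∀ (m : Nat) (t : Int), 0 ≤ t → (n - t).toNat = m →
    ∀ (rs : List Int), rs.length = n.toNat → ∀ k : Nat,
      ((PySem.List.pyRange t n 1).foldl (pvScatterRow M n) rs).getD k 0 =
        rs.getD k 0 + (if t ≤ (k : Int) ∧ (k : Int) < n then
          pvRowTail M k k n + pvColSum M t k k else 0) := by
  intro m
  induction m with
  | zero =>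
    intro t ht h0 rs hlen k
    rw [PySem.List.pyRange_one_eq_nil (by omega)]
    simp only [List.foldl_nil]
    rw [if_neg (by omega)]
    ring
  | succ m ih =>
    intro t ht hm rs hlen k
    have htn : t < n := by omega
    rw [PySem.List.pyRange_one_cons htn, List.foldl_cons]
    rw [ih (t + 1) (by omega) (by omega) _ (by rw [pvScatterRow_length]; exact hlen)]
    have hrow : (pvScatterRow M n rs t).getD k 0 =
        rs.getD k 0 + (if (k : Int) = t then pvRowTail M t t n
          else if t ≤ (k : Int) ∧ (k : Int) < n then pvEnt M t k else 0) := by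
      unfold pvScatterRow
      exact pvScatterRow_inner M n t ht htn (n - t).toNat t le_rfl rfl rs hlen k
    rw [hrow]
    by_cases hkt : (k : Int) = t
    · have hCol : pvColSum M t k k = 0 := by
        unfold pvColSum
        rw [PySem.List.pyRange_one_eq_nil (by omega)]
        simp
      have hT : pvRowTail M t t n = pvRowTail M k k n := by rw [hkt]
      rw [if_pos hkt, hT,
        if_neg (by omega : ¬ ((t : Int) + 1 ≤ (k : Int) ∧ (k : Int) < n)),
        if_pos (And.intro (by omega : t ≤ (k : Int)) (by omega : (k : Int) < n)), hCol]
      ring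
    · by_cases hk : t ≤ (k : Int) ∧ (k : Int) < n
      · have hCol : pvColSum M t k k = pvEnt M t k + pvColSum M (t + 1) k k := by
          unfold pvColSum
          rw [PySem.List.pyRange_one_cons (by omega : t < (k : Int)), List.map_cons,
            List.sum_cons]
        rw [if_neg hkt, if_pos (And.intro (by omega : t ≤ (k : Int)) hk.2),
          if_pos (And.intro (by omega : t + 1 ≤ (k : Int)) hk.2),
          if_pos hk, hCol]
        ring
      · rw [if_neg hkt, if_neg (by omega : ¬ (t ≤ (k : Int) ∧ (k : Int) < n)),
          if_neg (by omega : ¬ (t + 1 ≤ (k : Int) ∧ (k : Int) < n)), if_neg hk]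
        ring

-- A's row sum splits at k into column part [0, k) and row part [k, n)
theorem pvRowS_split (M : List (List Int)) (n : Int) (k : Nat) (hk : (k : Int) < n) :
    pvRowS M n (k : Int) = pvRowTail M k k n + pvColSum M 0 k k := by
  unfold pvRowS pvRowTail pvColSum
  rw [PySem.List.pyRange_one_append 0 (k : Int) n (by omega) (by omega), List.map_append,
    List.sum_append]
  have h1 : (PySem.List.pyRange 0 (k : Int) 1).map
      (fun j => if (k : Int) > j then pvEnt M j k else pvEnt M k j) =
      (PySem.List.pyRange 0 (k : Int) 1).map (fun i => pvEnt M i k) := by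
    apply List.map_congr_left
    intro j hj
    rw [PySem.List.mem_pyRange_one] at hj
    rw [if_pos (by omega)]
  have h2 : (PySem.List.pyRange (k : Int) n 1).map
      (fun j => if (k : Int) > j then pvEnt M j k else pvEnt M k j) =
      (PySem.List.pyRange (k : Int) n 1).map (fun j => pvEnt M k j) := by
    apply List.map_congr_left
    intro j hj
    rw [PySem.List.mem_pyRange_one] at hj
    rw [if_neg (by omega)]
  rw [h1, h2]
  ring

-- A as a fold of the running minimum over the row sums pvRowS
theorem pvA_eq (M : List (List Int)) (n : Int) :
    min_degree M n = (PySem.List.pyRange 0 n 1).foldl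
      (fun m i => if pvRowS M n i < m then pvRowS M n i else m) n := by
  unfold min_degree
  congr 1
  funext m i
  rw [show (fun (rowsum j : Int) =>
        if i > j then rowsum + PySem.List.pyGetD (PySem.List.pyGetD M j []) i 0
        else rowsum + PySem.List.pyGetD (PySem.List.pyGetD M i []) j 0) =
      (fun (rowsum j : Int) => rowsum + (if i > j then pvEnt M j i else pvEnt M i j)) from
    funext fun s => funext fun j => by unfold pvEnt; split_ifs <;> rfl]
  rw [PySem.List.foldl_add]
  simp [pvRowS]

-- B's scattered array is exactly the list of A's row sums
theorem pvRowsum_eq (M : List (List Int)) (n : Int) :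
    (PySem.List.pyRange 0 n 1).foldl (pvScatterRow M n) (List.replicate n.toNat 0) =
      (PySem.List.pyRange 0 n 1).map (pvRowS M n) := by
  apply List.ext_getElem
  · rw [List.length_map, PySem.List.length_pyRange_one]
    have : ∀ (l : List Int) (rs : List Int),
        (l.foldl (pvScatterRow M n) rs).length = rs.length := by
      intro l
      induction l with
      | nil => intro rs; rfl
      | cons x xs ih => intro rs; simp only [List.foldl_cons]; rw [ih, pvScatterRow_length]
    rw [this, List.length_replicate]
    omega
  · intro k h1 h2
    have hlen : (List.replicate n.toNat (0 : Int)).length = n.toNat := List.length_replicate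
    have hkN : k < n.toNat := by
      rw [List.length_map, PySem.List.length_pyRange_one] at h2
      omega
    have hkn : (k : Int) < n := by omega
    rw [← List.getD_eq_getElem _ (0 : Int) h1, ← List.getD_eq_getElem _ (0 : Int) h2]
    rw [pvScatter_outer M n (n - 0).toNat 0 le_rfl rfl _ hlen k]
    have hR : (List.map (pvRowS M n) (PySem.List.pyRange 0 n 1)).getD k 0 =
        pvRowS M n (0 + (k : Int)) := by
      rw [List.getD_eq_getElem _ (0 : Int) h2, List.getElem_map,
        PySem.List.getElem_pyRange_one]
    rw [hR, zero_add, List.getD_replicate (0 : Int) hkN,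
      if_pos (And.intro (by omega : (0 : Int) ≤ (k : Int)) hkn), pvRowS_split M n k hkn]
    ring

-- ===== VERDICT (by name: the statement is the Claim_ definition above) =====
theorem min_degree_spec : Claim_equal_min_degree := by
  intro M n _ _
  unfold Spec_min_degree min_degree_alt
  rw [pvRowsum_eq, List.foldl_map, pvA_eq]
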